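/- GENERATED by c/gen_decode.py: every decode fact of the image. -/
import ProgX.Base.Dec.D000
import ProgX.Base.Dec.D001
import ProgX.Base.Dec.D002
import ProgX.Base.Dec.D003
import ProgX.Base.Dec.D004
import ProgX.Base.Dec.D005
import ProgX.Base.Dec.D006
import ProgX.Base.Dec.D007
import ProgX.Base.Dec.D008
import ProgX.Base.Dec.D009
import ProgX.Base.Dec.D010
import ProgX.Base.Dec.D011
import ProgX.Base.Dec.D012
import ProgX.Base.Dec.D013
import ProgX.Base.Dec.D014
import ProgX.Base.Dec.D015
import ProgX.Base.Dec.D016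
import ProgX.Base.Dec.D017
import ProgX.Base.Dec.D018
import ProgX.Base.Dec.D019
import ProgX.Base.Dec.D020
import ProgX.Base.Dec.D021
import ProgX.Base.Dec.D022
import ProgX.Base.Dec.D023
import ProgX.Base.Dec.D024
import ProgX.Base.Dec.D025
import ProgX.Base.Dec.D026
import ProgX.Base.Dec.D027
import ProgX.Base.Dec.D028
import ProgX.Base.Dec.D029
import ProgX.Base.Dec.D030
import ProgX.Base.Dec.D031
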